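-- pv_equiv track=rewrite | github.com/guxinhui1991/LeetCode | TwoPointer/SlidingWindow/1989.py | catchMaximumAmountofPeople
-- ===== SOURCE A (Python) =====
-- from typing import List
--
-- def catchMaximumAmountofPeople(team: List[int], k: int) -> int:
--
--     t, p = [], []
--     for i,val in enumerate(team):
--         if val: t.append(i)
--         else: p.append(i)
--
--     res = 0
--     idx_p, idx_t = 0, 0
--     while idx_p < len(p) and idx_t < len(t):
--         if p[idx_p] - k <= t[idx_t] <= p[idx_p] + k:
--             res += 1
--             idx_p += 1
--             idx_t += 1
--         elif p[idx_p] + k < t[idx_t]: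
--             idx_p += 1
--         elif p[idx_p] - k > t[idx_t]:
--             idx_t += 1
--
--
--     return res
-- ===== SOURCE B (Python) =====
-- from typing import List
-- from collections import deque
--
-- def catchMaximumAmountofPeople(team: List[int], k: int) -> int:
--     # single streaming pass: queues of pending unmatched catcher / person indices
--     catchers, people = deque(), deque()
--     res = 0
--     for i, val in enumerate(team):
--         if val:
--             while people and people[0] < i - k:
--                 people.popleft()
--             if people and people[0] <= i + k:
--                 people.popleft()
--                 res += 1
--             else:
--                 catchers.append(i)
--         else:
--             while catchers and catchers[0] < i - k:
--                 catchers.popleft()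
--             if catchers and catchers[0] <= i + k:
--                 catchers.popleft()
--                 res += 1
--             else:
--                 people.append(i)
--     return res
-- ===== Notes on version B (the rewrite author's own statement) =====
-- stated objective: alternative
-- what changed: B replaces A's split-into-two-index-lists-then-two-pointer-scan with a single streaming pass over team that keeps two queues of pending unmatched catcher/person indices, expiring indices older than i-k and matching greedily on the fly.
import Mathlib
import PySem

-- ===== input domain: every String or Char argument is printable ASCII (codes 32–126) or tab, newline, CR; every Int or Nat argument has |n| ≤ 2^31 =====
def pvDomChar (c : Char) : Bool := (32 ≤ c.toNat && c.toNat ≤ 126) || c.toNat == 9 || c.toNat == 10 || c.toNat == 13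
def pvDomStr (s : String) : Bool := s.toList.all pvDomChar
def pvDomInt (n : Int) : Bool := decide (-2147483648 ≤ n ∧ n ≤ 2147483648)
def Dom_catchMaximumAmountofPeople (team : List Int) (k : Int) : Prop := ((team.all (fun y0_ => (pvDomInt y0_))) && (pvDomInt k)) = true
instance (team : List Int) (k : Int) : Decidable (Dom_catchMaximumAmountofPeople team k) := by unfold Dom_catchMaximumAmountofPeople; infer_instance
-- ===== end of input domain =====

-- B re-implements the greedy catcher/person matching as ONE streaming pass over team with two
-- pending-index queues (alternative decomposition, same O(n) cost; return value only, no mutation).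


-- ===== PORT A =====

-- first loop of A: split indices into catcher list t and person list p
def splitStep (tp : List Int × List Int) (x : Int × Int) : List Int × List Int :=
  if x.2 ≠ 0 then (tp.1 ++ [x.1], tp.2) else (tp.1, tp.2 ++ [x.1])

-- A's while loop over the two index lists (suffixes stand for the idx_t/idx_p pointers).
-- The final 'else 0' is dead code: the three conditions are exhaustive (in Python the loop
-- body would simply never hit a fourth case).
def loopA (k : Int) : List Int → List Int → Int
  | t0 :: ts, p0 :: ps =>
      if p0 - k ≤ t0 ∧ t0 ≤ p0 + k then 1 + loopA k ts ps
      else if p0 + k < t0 then loopA k (t0 :: ts) ps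
      else if p0 - k > t0 then loopA k ts (p0 :: ps)
      else 0
  | _, _ => 0
termination_by t p => t.length + p.length

def catchMaximumAmountofPeople (team : List Int) (k : Int) : Int :=
  let tp := (PySem.List.enumerate team).foldl splitStep ([], [])
  loopA k tp.1 tp.2

-- ===== PORT B =====

-- 'while q and q[0] < bound: q.popleft()'
def expireB (bound : Int) : List Int → List Int
  | [] => []
  | x :: xs => if x < bound then expireB bound xs else x :: xs

-- body of B's single for-loop; state = (res, catchers queue, people queue)
def stepB (k : Int) (st : Int × List Int × List Int) (x : Int × Int) : Int × List Int × List Int :=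
  let i := x.1
  if x.2 ≠ 0 then
    match expireB (i - k) st.2.2 with
    | p0 :: rest =>
        if p0 ≤ i + k then (st.1 + 1, st.2.1, rest)
        else (st.1, st.2.1 ++ [i], p0 :: rest)
    | [] => (st.1, st.2.1 ++ [i], [])
  else
    match expireB (i - k) st.2.1 with
    | c0 :: rest =>
        if c0 ≤ i + k then (st.1 + 1, rest, st.2.2)
        else (st.1, c0 :: rest, st.2.2 ++ [i])
    | [] => (st.1, [], st.2.2 ++ [i])

def catchMaximumAmountofPeople_alt (team : List Int) (k : Int) : Int :=
  ((PySem.List.enumerate team).foldl (stepB k) (0, [], [])).1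

-- ===== PRECONDITION & SPEC =====
def Spec_catchMaximumAmountofPeople (team : List Int) (k : Int) (out : Int) : Prop := out = catchMaximumAmountofPeople_alt team k
instance (team : List Int) (k : Int) (out : Int) : Decidable (Spec_catchMaximumAmountofPeople team k out) := by unfold Spec_catchMaximumAmountofPeople; infer_instance

-- ===== CLAIM (what is proved, stated in full; the proofs are below) =====
def Claim_equal_catchMaximumAmountofPeople : Prop := ∀ (team : List Int) (k : Int), Dom_catchMaximumAmountofPeople team k → Spec_catchMaximumAmountofPeople team k (catchMaximumAmountofPeople team k)

-- ===== LEMMAS AND PROOFS =====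

-- A's loop, instrumented with its leftover suffixes (proof device).
def runA (k : Int) : List Int → List Int → Int × List Int × List Int
  | [], p => (0, [], p)
  | t0 :: ts, [] => (0, t0 :: ts, [])
  | t0 :: ts, p0 :: ps =>
      if p0 - k ≤ t0 ∧ t0 ≤ p0 + k then
        let r := runA k ts ps
        (r.1 + 1, r.2)
      else if p0 + k < t0 then runA k (t0 :: ts) ps
      else runA k ts (p0 :: ps)
termination_by t p => t.length + p.length

lemma runA_fst (k : Int) (t p : List Int) : (runA k t p).1 = loopA k t p := by
  fun_induction runA k t p with
  | case1 p => simp [loopA]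
  | case2 t0 ts => simp [loopA]
  | case3 t0 ts p0 ps h r ih =>
      simp only [loopA]
      rw [if_pos h]
      simp [ih, r]; omega
  | case4 t0 ts p0 ps h1 h2 ih =>
      simp only [loopA]
      rw [if_neg h1, if_pos h2, ih]
  | case5 t0 ts p0 ps h1 h2 ih =>
      have h3 : p0 - k > t0 := by omega
      simp only [loopA]
      rw [if_neg h1, if_neg h2, if_pos h3, ih]

lemma runA_empty (k : Int) (t p : List Int) : (runA k t p).2.1 = [] ∨ (runA k t p).2.2 = [] := by
  fun_induction runA k t p with
  | case1 p => simp
  | case2 t0 ts => simp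
  | case3 t0 ts p0 ps h r ih => simpa [r] using ih
  | case4 t0 ts p0 ps h1 h2 ih => exact ih
  | case5 t0 ts p0 ps h1 h2 ih => exact ih

lemma runA_fix (k : Int) (t p : List Int) (h : t = [] ∨ p = []) : runA k t p = (0, t, p) := by
  rcases h with h | h <;> subst h
  · cases p <;> simp [runA]
  · cases t <;> simp [runA]

lemma runA_mem (k : Int) (t p : List Int) :
    (∀ x ∈ (runA k t p).2.1, x ∈ t) ∧ (∀ x ∈ (runA k t p).2.2, x ∈ p) := by
  fun_induction runA k t p with
  | case1 p => simp
  | case2 t0 ts => simp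
  | case3 t0 ts p0 ps h r ih =>
      simp only [r]
      exact ⟨fun x hx => List.mem_cons_of_mem _ (ih.1 x hx),
             fun x hx => List.mem_cons_of_mem _ (ih.2 x hx)⟩
  | case4 t0 ts p0 ps h1 h2 ih =>
      exact ⟨ih.1, fun x hx => List.mem_cons_of_mem _ (ih.2 x hx)⟩
  | case5 t0 ts p0 ps h1 h2 ih =>
      exact ⟨fun x hx => List.mem_cons_of_mem _ (ih.1 x hx), ih.2⟩

lemma runA_append (k : Int) (t p t2 p2 : List Int) :
    runA k (t ++ t2) (p ++ p2) =
      ((runA k t p).1 + (runA k ((runA k t p).2.1 ++ t2) ((runA k t p).2.2 ++ p2)).1,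
       (runA k ((runA k t p).2.1 ++ t2) ((runA k t p).2.2 ++ p2)).2) := by
  fun_induction runA k t p generalizing t2 p2 with
  | case1 p => simp
  | case2 t0 ts => simp
  | case3 t0 ts p0 ps h r ih =>
      have hL : runA k ((t0 :: ts) ++ t2) ((p0 :: ps) ++ p2) =
          ((runA k (ts ++ t2) (ps ++ p2)).1 + 1, (runA k (ts ++ t2) (ps ++ p2)).2) := by
        simp only [List.cons_append, runA]
        rw [if_pos h]
      rw [hL, ih t2 p2]
      simp only [r, Prod.mk.injEq]
      exact ⟨by omega, by first | rfl | trivial⟩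
  | case4 t0 ts p0 ps h1 h2 ih =>
      have hL : runA k ((t0 :: ts) ++ t2) ((p0 :: ps) ++ p2) = runA k ((t0 :: ts) ++ t2) (ps ++ p2) := by
        simp only [List.cons_append, runA]
        rw [if_neg h1, if_pos h2]
      rw [hL]
      exact ih t2 p2
  | case5 t0 ts p0 ps h1 h2 ih =>
      have hL : runA k ((t0 :: ts) ++ t2) ((p0 :: ps) ++ p2) = runA k (ts ++ t2) ((p0 :: ps) ++ p2) := by
        simp only [List.cons_append, runA]
        rw [if_neg h1, if_neg h2]
      rw [hL]
      exact ih t2 p2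

-- A's whole algorithm as a left fold (continuing the loop each time one index arrives).
def stepA (k : Int) (st : Int × List Int × List Int) (x : Int × Int) : Int × List Int × List Int :=
  if x.2 ≠ 0 then
    let s := runA k (st.2.1 ++ [x.1]) st.2.2
    (st.1 + s.1, s.2)
  else
    let s := runA k st.2.1 (st.2.2 ++ [x.1])
    (st.1 + s.1, s.2)

def tOf (es : List (Int × Int)) : List Int := (es.filter (fun x => x.2 != 0)).map (·.1)
def pOf (es : List (Int × Int)) : List Int := (es.filter (fun x => x.2 == 0)).map (·.1)

lemma buildSplit (es : List (Int × Int)) : ∀ t0 p0 : List Int,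
    es.foldl splitStep (t0, p0) = (t0 ++ tOf es, p0 ++ pOf es) := by
  induction es with
  | nil => simp [tOf, pOf]
  | cons x rest ih =>
      intro t0 p0
      by_cases h : x.2 = 0 <;>
        simp [splitStep, h, ih, tOf, pOf, List.filter_cons]

lemma foldA (k : Int) (es : List (Int × Int)) : ∀ (res : Int) (lt lp : List Int),
    (lt = [] ∨ lp = []) →
    es.foldl (stepA k) (res, lt, lp) =
      (res + (runA k (lt ++ tOf es) (lp ++ pOf es)).1, (runA k (lt ++ tOf es) (lp ++ pOf es)).2) := by
  induction es with
  | nil =>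
      intro res lt lp h
      simp [tOf, pOf, runA_fix k lt lp h]
  | cons x rest ih =>
      intro res lt lp h
      by_cases hx : x.2 = 0
      · have hstep : stepA k (res, lt, lp) x =
            (res + (runA k lt (lp ++ [x.1])).1, (runA k lt (lp ++ [x.1])).2) := by
          simp [stepA, hx]
        have hofs : tOf (x :: rest) = tOf rest ∧ pOf (x :: rest) = x.1 :: pOf rest := by
          constructor <;> simp [tOf, pOf, List.filter_cons, hx]
        have hone := runA_empty k lt (lp ++ [x.1])
        rw [List.foldl_cons, hstep, ih _ _ _ hone, hofs.1, hofs.2]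
        rw [show lp ++ x.1 :: pOf rest = (lp ++ [x.1]) ++ pOf rest by simp]
        rw [runA_append k lt (lp ++ [x.1]) (tOf rest) (pOf rest)]
        simp only [Prod.mk.injEq]
        exact ⟨by omega, by first | rfl | trivial⟩
      · have hstep : stepA k (res, lt, lp) x =
            (res + (runA k (lt ++ [x.1]) lp).1, (runA k (lt ++ [x.1]) lp).2) := by
          simp [stepA, hx]
        have hofs : tOf (x :: rest) = x.1 :: tOf rest ∧ pOf (x :: rest) = pOf rest := by
          constructor <;> simp [tOf, pOf, List.filter_cons, hx]
        have hone := runA_empty k (lt ++ [x.1]) lp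
        rw [List.foldl_cons, hstep, ih _ _ _ hone, hofs.1, hofs.2]
        rw [show lt ++ x.1 :: tOf rest = (lt ++ [x.1]) ++ tOf rest by simp]
        rw [runA_append k (lt ++ [x.1]) lp (tOf rest) (pOf rest)]
        simp only [Prod.mk.injEq]
        exact ⟨by omega, by first | rfl | trivial⟩

lemma expire_sub (b : Int) (l : List Int) : ∀ x ∈ expireB b l, x ∈ l := by
  induction l with
  | nil => simp [expireB]
  | cons y ys ih =>
      intro x hx
      by_cases h : y < b
      · simp only [expireB, if_pos h] at hx
        exact List.mem_cons_of_mem _ (ih x hx)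
      · simp only [expireB, if_neg h] at hx
        exact hx

lemma expire_head (b : Int) (l : List Int) : ∀ h t, expireB b l = h :: t → b ≤ h := by
  induction l with
  | nil => simp [expireB]
  | cons y ys ih =>
      intro h t hht
      by_cases hy : y < b
      · simp only [expireB, if_pos hy] at hht
        exact ih h t hht
      · simp only [expireB, if_neg hy] at hht
        cases hht
        omega

-- continuing A's loop with one new catcher index i against the people queue qp
-- is exactly B's expire-then-try-match step.
lemma runA_single_t (k i : Int) (qp : List Int) :
    runA k [i] qp =
      match expireB (i - k) qp with
      | [] => (0, [i], [])
      | p0 :: rest => if p0 ≤ i + k then (1, [], rest) else (0, [], p0 :: rest) := by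
  induction qp with
  | nil => simp [runA, expireB]
  | cons p0 ps ih =>
      by_cases h1 : p0 < i - k
      · have hc1 : ¬(p0 - k ≤ i ∧ i ≤ p0 + k) := by omega
        have hc2 : p0 + k < i := by omega
        have : runA k [i] (p0 :: ps) = runA k [i] ps := by
          simp only [runA]
          rw [if_neg hc1, if_pos hc2]
        rw [this, ih]
        simp [expireB, h1]
      · by_cases h2 : p0 ≤ i + k
        · have hc1 : p0 - k ≤ i ∧ i ≤ p0 + k := by omega
          simp [runA, hc1, expireB, h1, h2]
        · have hc1 : ¬(p0 - k ≤ i ∧ i ≤ p0 + k) := by omega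
          have hc2 : ¬(p0 + k < i) := by omega
          simp [runA, hc1, hc2, expireB, h1, h2]

-- ... and symmetrically for one new person index i against the catchers queue qc (k ≥ 0).
lemma runA_single_p (k i : Int) (hk : 0 ≤ k) (qc : List Int) :
    runA k qc [i] =
      match expireB (i - k) qc with
      | [] => (0, [], [i])
      | c0 :: rest => if c0 ≤ i + k then (1, rest, []) else (0, c0 :: rest, []) := by
  induction qc with
  | nil => simp [runA, expireB]
  | cons c0 cs ih =>
      by_cases h1 : c0 < i - k
      · have hc1 : ¬(i - k ≤ c0 ∧ c0 ≤ i + k) := by omega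
        have hc2 : ¬(i + k < c0) := by omega
        have : runA k (c0 :: cs) [i] = runA k cs [i] := by
          simp only [runA]
          rw [if_neg hc1, if_neg hc2]
        rw [this, ih]
        simp [expireB, h1]
      · by_cases h2 : c0 ≤ i + k
        · have hc1 : i - k ≤ c0 ∧ c0 ≤ i + k := by omega
          simp [runA, hc1, expireB, h1, h2, runA_fix]
        · have hc1 : ¬(i - k ≤ c0 ∧ c0 ≤ i + k) := by omega
          have hc2 : i + k < c0 := by omega
          simp [runA, hc1, hc2, expireB, h1, h2]

lemma stepB_eq_stepA (k i v res : Int) (lt lp : List Int) (hk : 0 ≤ k)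
    (he : lt = [] ∨ lp = []) (hlt : ∀ x ∈ lt, x < i) (hlp : ∀ x ∈ lp, x < i) :
    stepB k (res, lt, lp) (i, v) = stepA k (res, lt, lp) (i, v) := by
  by_cases hv : v = 0
  · -- person arrives
    rcases he with he | he
    · subst he
      simp [stepB, stepA, hv, expireB, runA]
    · subst he
      rw [show stepA k (res, lt, []) (i, v) =
            (res + (runA k lt [i]).1, (runA k lt [i]).2) by simp [stepA, hv]]
      rw [runA_single_p k i hk lt]
      rcases hE : expireB (i - k) lt with _ | ⟨c0, rest⟩
      · simp [stepB, hv, hE]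
      · have hc0i : c0 < i := hlt c0 (expire_sub _ _ _ (hE ▸ List.mem_cons_self ..))
        have : c0 ≤ i + k := by omega
        simp [stepB, hv, hE, this]
  · -- catcher arrives
    rcases he with he | he
    swap
    · subst he
      simp [stepB, stepA, hv, expireB, runA_fix]
    · subst he
      rw [show stepA k (res, [], lp) (i, v) =
            (res + (runA k [i] lp).1, (runA k [i] lp).2) by simp [stepA, hv]]
      rw [runA_single_t k i lp]
      rcases hE : expireB (i - k) lp with _ | ⟨p0, rest⟩
      · simp [stepB, hv, hE]
      · have hp0i : p0 < i := hlp p0 (expire_sub _ _ _ (hE ▸ List.mem_cons_self ..))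
        have : p0 ≤ i + k := by omega
        simp [stepB, hv, hE, this]

lemma sim (k : Int) (hk : 0 ≤ k) (es : List (Int × Int)) : ∀ (res : Int) (lt lp : List Int),
    (lt = [] ∨ lp = []) →
    (∀ x ∈ lt, ∀ e ∈ es, x < e.1) → (∀ x ∈ lp, ∀ e ∈ es, x < e.1) →
    es.Pairwise (fun a b : Int × Int => a.1 < b.1) →
    es.foldl (stepB k) (res, lt, lp) = es.foldl (stepA k) (res, lt, lp) := by
  induction es with
  | nil => intro _ _ _ _ _ _ _; rfl
  | cons e rest ih =>
      intro res lt lp he hlt hlp hpw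
      obtain ⟨i, v⟩ := e
      have hstep := stepB_eq_stepA k i v res lt lp hk he
        (fun x hx => hlt x hx (i, v) (List.mem_cons_self ..))
        (fun x hx => hlp x hx (i, v) (List.mem_cons_self ..))
      rw [List.foldl_cons, List.foldl_cons, hstep]
      -- the new state comes from stepA: one queue empty, elements ∈ old queues ∪ {i}
      have hi_lt : ∀ e' ∈ rest, i < e'.1 := by
        intro e' he'
        exact (List.pairwise_cons.mp hpw).1 e' he'
      by_cases hv : v = 0
      · have hform : stepA k (res, lt, lp) (i, v) =
            (res + (runA k lt (lp ++ [i])).1, (runA k lt (lp ++ [i])).2) := by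
          simp [stepA, hv]
        rw [hform]
        apply ih
        · exact runA_empty k lt (lp ++ [i])
        · intro x hx e' he'
          have hxm := (runA_mem k lt (lp ++ [i])).1 x hx
          exact hlt x hxm e' (List.mem_cons_of_mem _ he')
        · intro x hx e' he'
          have hxm := (runA_mem k lt (lp ++ [i])).2 x hx
          rcases List.mem_append.mp hxm with h | h
          · exact hlp x h e' (List.mem_cons_of_mem _ he')
          · simp at h; subst h; exact hi_lt e' he'
        · exact (List.pairwise_cons.mp hpw).2
      · have hform : stepA k (res, lt, lp) (i, v) =
            (res + (runA k (lt ++ [i]) lp).1, (runA k (lt ++ [i]) lp).2) := by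
          simp [stepA, hv]
        rw [hform]
        apply ih
        · exact runA_empty k (lt ++ [i]) lp
        · intro x hx e' he'
          have hxm := (runA_mem k (lt ++ [i]) lp).1 x hx
          rcases List.mem_append.mp hxm with h | h
          · exact hlt x h e' (List.mem_cons_of_mem _ he')
          · simp at h; subst h; exact hi_lt e' he'
        · intro x hx e' he'
          have hxm := (runA_mem k (lt ++ [i]) lp).2 x hx
          exact hlp x hxm e' (List.mem_cons_of_mem _ he')
        · exact (List.pairwise_cons.mp hpw).2

-- k < 0: A never matches (the match interval is empty) …
lemma loopA_neg (k : Int) (hk : k < 0) (t p : List Int) : loopA k t p = 0 := by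
  fun_induction loopA k t p with
  | case1 t0 ts p0 ps h ih =>
      exfalso; omega
  | case2 t0 ts p0 ps h1 h2 ih => simpa [loopA, h1, h2] using ih
  | case3 t0 ts p0 ps h1 h2 h3 ih => simpa [loopA, h1, h2, h3] using ih
  | case4 t0 ts p0 ps h1 h2 h3 => simp [loopA, h1, h2, h3]
  | case5 t p h => simp [loopA]

-- … and neither does B: any expire survivor p0 has i - k ≤ p0, so p0 ≤ i + k would force 0 ≤ k.
lemma stepB_neg (k : Int) (hk : k < 0) (es : List (Int × Int)) : ∀ (res : Int) (lt lp : List Int),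
    (es.foldl (stepB k) (res, lt, lp)).1 = res := by
  induction es with
  | nil => intro _ _ _; rfl
  | cons e rest ih =>
      intro res lt lp
      obtain ⟨i, v⟩ := e
      rw [List.foldl_cons]
      by_cases hv : v = 0
      · rcases hE : expireB (i - k) lt with _ | ⟨c0, cs⟩
        · rw [show stepB k (res, lt, lp) (i, v) = (res, [], lp ++ [i]) by
            simp [stepB, hv, hE], ih]
        · have h1 : i - k ≤ c0 := expire_head _ _ _ _ hE
          have h2 : ¬(c0 ≤ i + k) := by omega
          rw [show stepB k (res, lt, lp) (i, v) = (res, c0 :: cs, lp ++ [i]) by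
            simp [stepB, hv, hE, h2], ih]
      · rcases hE : expireB (i - k) lp with _ | ⟨p0, ps⟩
        · rw [show stepB k (res, lt, lp) (i, v) = (res, lt ++ [i], []) by
            simp [stepB, hv, hE], ih]
        · have h1 : i - k ≤ p0 := expire_head _ _ _ _ hE
          have h2 : ¬(p0 ≤ i + k) := by omega
          rw [show stepB k (res, lt, lp) (i, v) = (res, lt ++ [i], p0 :: ps) by
            simp [stepB, hv, hE, h2], ih]

lemma main_eq (team : List Int) (k : Int) :
    catchMaximumAmountofPeople team k = catchMaximumAmountofPeople_alt team k := by
  unfold catchMaximumAmountofPeople catchMaximumAmountofPeople_alt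
  set es := PySem.List.enumerate team with hes
  rw [buildSplit es [] []]
  by_cases hk : 0 ≤ k
  · rw [sim k hk es 0 [] [] (Or.inl rfl) (by simp) (by simp)
      (by simpa [hes] using PySem.List.pairwise_lt_enumerate (xs := team) (s := 0))]
    rw [foldA k es 0 [] [] (Or.inl rfl)]
    simp [runA_fst]
  · rw [stepB_neg k (by omega) es 0 [] []]
    simp [loopA_neg k (by omega)]

-- ===== VERDICT (by name: the statement is the Claim_ definition above) =====
theorem catchMaximumAmountofPeople_spec : Claim_equal_catchMaximumAmountofPeople := by
  intro team k _
  exact main_eq team k
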